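-- pv_equiv track=rewrite | github.com/rvaughan/AdventOfCode2017 | 2015/day_19/solution_p2.py | load_replacements
-- ===== SOURCE A (Python) =====
-- def add_replacement(line):
--     pieces = line.split(' ')
--
--     replacement = []
--
--     replacement.append(pieces[0])
--     replacement.append(pieces[2])
--
--     return replacement
--
-- def load_replacements(input_data):
--     replacements = []
--     molecule = ""
--     all_replacements_processed = False
--     for line in input_data:
--         if line == "":
--             all_replacements_processed = True
--         else:
--             if not all_replacements_processed:
--                 replacements.append(add_replacement(line))
--             else:
--                 molecule = line
--
--     return replacements, molecule
-- ===== SOURCE B (Python) =====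
-- def load_replacements(input_data):
--     lines = list(input_data)
--     try:
--         cut = lines.index('')
--         head, tail = lines[:cut], lines[cut + 1:]
--     except ValueError:
--         head, tail = lines, []
--     replacements = [[p[0], p[2]] for p in (line.split(' ') for line in head)]
--     molecule = ''
--     for line in reversed(tail):
--         if line != '':
--             molecule = line
--             break
--     return replacements, molecule
-- ===== Notes on version B (the rewrite author's own statement) =====
-- stated objective: simpler
-- what changed: Replaced A's stateful single-pass loop with a boolean 'seen separator' flag by a partition at the first empty line (list.index) followed by a comprehension over the rule section and a reversed scan for the last non-empty line of the molecule section.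
import Mathlib
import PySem

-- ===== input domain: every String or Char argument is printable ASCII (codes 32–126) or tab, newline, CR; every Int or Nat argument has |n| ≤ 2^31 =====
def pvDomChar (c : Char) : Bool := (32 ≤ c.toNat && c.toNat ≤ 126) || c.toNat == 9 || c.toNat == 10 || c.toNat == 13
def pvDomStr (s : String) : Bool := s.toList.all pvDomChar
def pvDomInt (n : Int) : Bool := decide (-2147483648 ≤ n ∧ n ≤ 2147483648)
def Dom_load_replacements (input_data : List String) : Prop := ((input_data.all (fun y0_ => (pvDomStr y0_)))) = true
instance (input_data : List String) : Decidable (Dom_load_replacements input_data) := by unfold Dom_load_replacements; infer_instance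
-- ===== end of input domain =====

-- B replaces A's flag-driven single pass by a partition at the first empty line,
-- a comprehension over the rule section, and a reversed scan for the molecule: simpler decomposition.
-- ===== PORT A =====
-- line.split(' ') is exact via PySem.Str.split?; sep " " ≠ "" so getD [] never fires.
-- pieces[0]/pieces[2]: Python's split(' ') never returns [], and Pre_ guarantees a third
-- piece on every line A indexes, so List.getD "" is exact on Pre_.
def add_replacement (line : String) : List String :=
  let pieces := (PySem.Str.split? line " ").getD []
  (([] ++ [pieces.getD 0 ""]) ++ [pieces.getD 2 ""])

def pvStepA (st : List (List String) × String × Bool) (line : String) :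
    List (List String) × String × Bool :=
  if line = "" then (st.1, st.2.1, true)
  else if st.2.2 = false then (st.1 ++ [add_replacement line], st.2.1, st.2.2)
  else (st.1, line, st.2.2)

def load_replacements (input_data : List String) : List (List String) × String :=
  let st := input_data.foldl pvStepA ([], "", false)
  (st.1, st.2.1)

-- ===== PORT B =====
def pvRule (line : String) : List String :=
  let p := (PySem.Str.split? line " ").getD []
  [p.getD 0 "", p.getD 2 ""]

def pvParts (input_data : List String) : List String × List String :=
  match PySem.List.index? input_data "" with
  | some i => (input_data.take i, input_data.drop (i + 1))
  | none   => (input_data, [])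

def load_replacements_alt (input_data : List String) : List (List String) × String :=
  let parts := pvParts input_data
  (parts.1.map pvRule, (parts.2.reverse.find? (fun l => l != "")).getD "")

-- ===== PRECONDITION & SPEC =====
-- Pre_ excludes exactly the inputs where some line before the first empty line has fewer
-- than 3 space-separated pieces: there Python A (and Python B alike) raise IndexError.
def Pre_load_replacements (input_data : List String) : Prop :=
  ∀ line ∈ input_data.takeWhile (fun l => l ≠ ""), 3 ≤ ((PySem.Str.split? line " ").getD []).length
instance (input_data : List String) : Decidable (Pre_load_replacements input_data) := by unfold Pre_load_replacements; infer_instance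

def pvWitness_load_replacements : List String := ["H => HO", "O => OH", "", "HOH"]

def Spec_load_replacements (input_data : List String) (out : List (List String) × String) : Prop := out = load_replacements_alt input_data
instance (input_data : List String) (out : List (List String) × String) : Decidable (Spec_load_replacements input_data out) := by unfold Spec_load_replacements; infer_instance

-- ===== CLAIM (what is proved, stated in full; the proofs are below) =====
def Claim_equal_load_replacements : Prop := ∀ (input_data : List String), Dom_load_replacements input_data → Pre_load_replacements input_data → Spec_load_replacements input_data (load_replacements input_data)

-- ===== LEMMAS AND PROOFS =====

-- once the flag is true, A's loop keeps the replacements and tracks the last non-empty line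
lemma foldA_true (l : List String) (reps : List (List String)) (mol : String) :
    l.foldl pvStepA (reps, mol, true) =
      (reps, (l.reverse.find? (fun s => s != "")).getD mol, true) := by
  induction l generalizing mol with
  | nil => simp
  | cons h t ih =>
      simp only [List.foldl_cons, List.reverse_cons, List.find?_append]
      by_cases hh : h = ""
      · rw [show pvStepA (reps, mol, true) h = (reps, mol, true) by simp [pvStepA, hh], ih]
        cases t.reverse.find? (fun s => s != "") <;> simp [hh]
      · rw [show pvStepA (reps, mol, true) h = (reps, h, true) by simp [pvStepA, hh], ih]
        cases t.reverse.find? (fun s => s != "") <;> simp [hh]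

lemma pvParts_cons_empty (t : List String) : pvParts ("" :: t) = ([], t) := by
  simp [pvParts, PySem.List.index?_eq_idxOf?, List.idxOf?_cons]

lemma pvParts_cons_ne (h : String) (t : List String) (hh : h ≠ "") :
    pvParts (h :: t) = (h :: (pvParts t).1, (pvParts t).2) := by
  simp only [pvParts, PySem.List.index?_eq_idxOf?, List.idxOf?_cons, beq_iff_eq]
  rw [if_neg (by simpa using (Ne.symm hh))]
  cases List.idxOf? "" t <;> simp

-- with the flag still false, A's loop computes B's partitioned result
lemma foldA_false (l : List String) (reps : List (List String)) :
    l.foldl pvStepA (reps, "", false) =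
      (reps ++ (load_replacements_alt l).1, (load_replacements_alt l).2, l.contains "") := by
  induction l generalizing reps with
  | nil => simp [load_replacements_alt, pvParts]
  | cons h t ih =>
      by_cases hh : h = ""
      · subst hh
        rw [List.foldl_cons, show pvStepA (reps, "", false) "" = (reps, "", true) from rfl,
          foldA_true]
        simp [load_replacements_alt, pvParts_cons_empty]
      · have hstep : pvStepA (reps, "", false) h = (reps ++ [add_replacement h], "", false) := by
          simp [pvStepA, hh]
        have hrule : add_replacement h = pvRule h := by
          simp [add_replacement, pvRule]
        rw [List.foldl_cons, hstep, ih]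
        simp [load_replacements_alt, pvParts_cons_ne h t hh, hrule, hh]

-- ===== VERDICT (by name: the statement is the Claim_ definition above) =====
theorem load_replacements_spec : Claim_equal_load_replacements := by
  intro input_data _ _
  show _ = _
  simp [load_replacements, foldA_false]
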